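-- pv_equiv track=rewrite | github.com/d1ssmuss/Codewars-2025 | Python/7 kyu Simple remove duplicates.py | solve
-- ===== SOURCE A (Python) =====
-- def solve(arr):
--     stack = []
--     for i in arr:
--         if i not in stack:
--             stack.append(i)
--         else:
--             stack.remove(i)
--             stack.append(i)
--     return stack
-- ===== SOURCE B (Python) =====
-- def solve(arr):
--     seen = set()
--     out = []
--     for x in reversed(arr):
--         if x not in seen:
--             seen.add(x)
--             out.append(x)
--     return out[::-1]
-- ===== Notes on version B (the rewrite author's own statement) =====
-- stated objective: faster
-- what changed: Replaces the quadratic left-to-right loop with per-element 'in'/remove scans on a list by a single right-to-left pass keeping first-seen elements in a hash set, then a reverse.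
import Mathlib
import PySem

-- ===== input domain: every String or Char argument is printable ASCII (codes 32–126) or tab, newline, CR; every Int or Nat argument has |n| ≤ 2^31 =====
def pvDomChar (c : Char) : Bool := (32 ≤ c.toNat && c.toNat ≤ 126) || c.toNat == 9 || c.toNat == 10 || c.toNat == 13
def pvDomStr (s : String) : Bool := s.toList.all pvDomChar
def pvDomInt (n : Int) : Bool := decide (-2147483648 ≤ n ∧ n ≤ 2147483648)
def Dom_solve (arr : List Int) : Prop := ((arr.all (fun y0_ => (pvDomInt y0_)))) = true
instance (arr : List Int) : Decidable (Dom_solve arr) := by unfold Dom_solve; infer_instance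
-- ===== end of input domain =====

-- B replaces A's quadratic list-membership/remove loop by a linear right-to-left pass
-- with a seen-set, then a reverse (objective: faster, asymptotic).

-- ===== PORT A =====
-- one iteration of A's loop body over the stack
def solveStepA (stack : List Int) (i : Int) : List Int :=
  if !(stack.contains i) then stack ++ [i]
  else ((PySem.List.remove? stack i).getD stack) ++ [i]

def solve (arr : List Int) : List Int := arr.foldl solveStepA []

-- ===== PORT B =====
-- one iteration of B's loop body over (seen, out)
def solveStepB (st : PySem.Set Int × List Int) (x : Int) : PySem.Set Int × List Int :=
  if !(PySem.Set.contains st.1 x) then (PySem.Set.add st.1 x, st.2 ++ [x])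
  else st

def solve_alt (arr : List Int) : List Int :=
  (arr.reverse.foldl solveStepB (PySem.Set.empty, [])).2.reverse

-- ===== PRECONDITION & SPEC =====
def Spec_solve (arr : List Int) (out : List Int) : Prop := out = solve_alt arr
instance (arr : List Int) (out : List Int) : Decidable (Spec_solve arr out) := by unfold Spec_solve; infer_instance

-- ===== CLAIM (what is proved, stated in full; the proofs are below) =====
def Claim_equal_solve : Prop := ∀ (arr : List Int), Dom_solve arr → Spec_solve arr (solve arr)

-- ===== LEMMAS AND PROOFS =====

-- A's step, in filter form (valid on duplicate-free stacks)
def stepF (stack : List Int) (i : Int) : List Int := stack.filter (fun y => y ≠ i) ++ [i]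

-- first-occurrence dedup of l, skipping elements of the seen list s
def fd : List Int → List Int → List Int
  | [], _ => []
  | x :: l, s => if x ∈ s then fd l s else x :: fd l (s ++ [x])

theorem fd_congr (l : List Int) : ∀ s t : List Int,
    (∀ y, y ∈ s ↔ y ∈ t) → fd l s = fd l t := by
  induction l with
  | nil => intro s t _; rfl
  | cons x l ih =>
    intro s t h
    simp only [fd]
    by_cases hx : x ∈ s
    · rw [if_pos hx, if_pos ((h x).mp hx)]
      exact ih s t h
    · rw [if_neg hx, if_neg (fun hc => hx ((h x).mpr hc))]
      refine congrArg _ (ih _ _ (fun y => ?_))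
      simp only [List.mem_append, List.mem_singleton]
      exact or_congr (h y) Iff.rfl

theorem fd_filter (x : Int) (l : List Int) : ∀ s : List Int, x ∉ s →
    fd l (s ++ [x]) = (fd l s).filter (fun y => y ≠ x) := by
  induction l with
  | nil => intro s _; rfl
  | cons z l ih =>
    intro s hs
    by_cases hzx : z = x
    · subst hzx
      have h1 : z ∈ s ++ [z] := by simp
      simp only [fd, if_pos h1, if_neg hs, ih s hs, List.filter_cons]
      simp [List.filter_filter]
    · have h2 : z ∈ s ++ [x] ↔ z ∈ s := by simp [hzx]
      by_cases hz : z ∈ s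
      · simp only [fd, if_pos (h2.mpr hz), if_pos hz]
        exact ih s hs
      · simp only [fd, if_neg (fun hc => hz (h2.mp hc)), if_neg hz, List.filter_cons]
        have hcongr : fd l (s ++ [x] ++ [z]) = fd l (s ++ [z] ++ [x]) := by
          apply fd_congr
          intro y
          simp only [List.mem_append, List.mem_singleton]
          tauto
        have hx2 : x ∉ s ++ [z] := by
          simp only [List.mem_append, List.mem_singleton]
          rintro (h | h)
          · exact hs h
          · exact hzx h.symm
        rw [hcongr, ih (s ++ [z]) hx2]
        simp [hzx]

-- A's fold equals the filter-form fold on duplicate-free accumulators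
theorem nodup_stepF (s : List Int) (i : Int) (hs : s.Nodup) : (stepF s i).Nodup := by
  unfold stepF
  refine List.Nodup.append (hs.filter _) (List.nodup_singleton i) ?_
  intro y hy hy'
  simp at hy hy'
  exact hy.2 hy'

theorem stepA_eq_stepF (s : List Int) (i : Int) (hs : s.Nodup) : solveStepA s i = stepF s i := by
  unfold solveStepA stepF
  by_cases h : s.contains i = true
  · have hi : i ∈ s := by simpa [List.contains_eq_mem] using h
    have hrem : PySem.List.remove? s i = some (s.erase i) :=
      PySem.List.remove?_eq_some_erase s i hi
    rw [if_neg (by simp [List.contains_eq_mem, hi]), hrem]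
    simp only [Option.getD_some]
    rw [hs.erase_eq_filter]
    congr 1
    exact List.filter_congr (fun y _ => by by_cases hy : y = i <;> simp [hy])
  · simp only [Bool.not_eq_true] at h
    have hi : i ∉ s := by simpa [List.contains_eq_mem] using h
    simp only [h, Bool.not_false, if_true]
    rw [List.filter_eq_self.mpr]
    intro y hy
    simp only [decide_eq_true_eq]
    rintro rfl; exact hi hy

theorem foldA_eq_foldF (l : List Int) : ∀ s : List Int, s.Nodup →
    l.foldl solveStepA s = l.foldl stepF s := by
  induction l with
  | nil => intro s _; rfl
  | cons x l ih =>
    intro s hs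
    simp only [List.foldl_cons, stepA_eq_stepF s x hs]
    exact ih _ (nodup_stepF s x hs)

-- B's fold appends exactly fd of the remaining input
theorem foldB_snd (l : List Int) : ∀ (seen out : List Int),
    (l.foldl solveStepB (seen, out)).2 = out ++ fd l seen := by
  induction l with
  | nil => intro seen out; simp [fd]
  | cons x l ih =>
    intro seen out
    simp only [List.foldl_cons, solveStepB, fd]
    by_cases h : x ∈ seen
    · simp [PySem.Set.contains, h, ih]
    · simp [PySem.Set.contains, PySem.Set.add, h, ih]

-- the bridge: A's fold over the input = reversed fd of the reversed input
theorem main_bridge (m : List Int) : (m.reverse).foldl stepF [] = (fd m []).reverse := by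
  induction m with
  | nil => rfl
  | cons x m ih =>
    simp only [List.reverse_cons, List.foldl_append, List.foldl_cons, List.foldl_nil, ih]
    show stepF (fd m []).reverse x = _
    have h1 : fd m [x] = (fd m []).filter (fun y => y ≠ x) := by
      simpa using fd_filter x m [] (List.not_mem_nil)
    unfold stepF
    simp only [fd, List.not_mem_nil, if_neg (fun h => h), List.nil_append,
      List.reverse_cons, h1]
    simp [List.filter_reverse]

-- ===== VERDICT (by name: the statement is the Claim_ definition above) =====
theorem solve_spec : Claim_equal_solve := by
  intro arr _
  show solve arr = solve_alt arr
  unfold solve solve_alt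
  rw [foldA_eq_foldF arr [] List.nodup_nil, foldB_snd, ← List.reverse_reverse arr]
  rw [main_bridge arr.reverse]
  simp
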